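-- pv_equiv track=rewrite | github.com/KESHAV-AGGARWAL001/YoutubeShortsAutomation | radha_krishna/youtube_uploader.py | _sanitize_tags
-- ===== SOURCE A (Python) =====
-- def _sanitize_tags(tags):
--     clean = []
--     total_len = 0
--     for tag in tags:
--         tag = tag.strip().lstrip("#")
--         tag = "".join(c for c in tag if c.isalnum() or c in " -'")
--         tag = tag.strip()
--         if not tag:
--             continue
--         if len(tag) > 30 and " " not in tag:
--             tag = tag[:30]
--         elif len(tag) > 100:
--             tag = tag[:100]
--         if total_len + len(tag) > 500:
--             break
--         clean.append(tag)
--         total_len += len(tag)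
--     return clean
-- ===== SOURCE B (Python) =====
-- def _sanitize_tags(tags):
--     # Cleaning collapsed to a single filter+strip (the strip/lstrip('#') prefix
--     # passes are redundant: '#' and non-space whitespace are dropped by the
--     # filter, edge spaces by the final strip); truncation is one slice with a
--     # computed limit; the budget loop is a recursive descent on the REMAINING
--     # budget, consing results front-to-back and stopping when a tag overflows.
--     def rec(it, budget):
--         for raw in it:
--             tag = "".join(c for c in raw if c.isalnum() or c in " -'").strip()
--             if tag:
--                 tag = tag[:30 if " " not in tag else 100]
--                 if len(tag) > budget:
--                     return []
--                 return [tag] + rec(it, budget - len(tag))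
--         return []
--     return rec(iter(tags), 500)
-- ===== Notes on version B (the rewrite author's own statement) =====
-- stated objective: alternative
-- what changed: B collapses A's four-stage cleaning (strip, lstrip('#'), filter, strip) into one filter+strip (the prefix passes are provably redundant since the filter drops '#' and non-space whitespace), replaces A's two-branch truncation by a single slice with a computed limit, and replaces A's accumulate-total-and-break loop by a recursive descent on the remaining budget that conses the output front-to-back.
import Mathlib
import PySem

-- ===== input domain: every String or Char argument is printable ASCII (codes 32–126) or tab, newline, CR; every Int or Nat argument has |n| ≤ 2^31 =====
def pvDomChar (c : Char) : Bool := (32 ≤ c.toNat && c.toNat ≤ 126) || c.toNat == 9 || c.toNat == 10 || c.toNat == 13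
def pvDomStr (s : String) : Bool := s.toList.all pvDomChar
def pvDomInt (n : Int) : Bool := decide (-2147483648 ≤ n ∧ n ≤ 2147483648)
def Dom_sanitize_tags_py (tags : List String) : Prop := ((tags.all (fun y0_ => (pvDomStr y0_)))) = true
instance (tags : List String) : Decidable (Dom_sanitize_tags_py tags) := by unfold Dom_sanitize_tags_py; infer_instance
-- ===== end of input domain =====

-- B replaces A's four-stage cleaning by one filter+strip (the strip/lstrip('#') passes are
-- redundant), the two-branch truncation by one computed-limit slice, and the accumulate-and-break
-- loop by a recursive descent on the remaining budget (alternative decomposition, not faster).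


-- the genexp condition `c.isalnum() or c in " -'"` (shared verbatim by both Pythons)
def pTag (c : Char) : Bool := PySem.Chars.isalnum c || c == ' ' || c == '-' || c == '\''

-- ===== PORT A =====
-- Hand-ported pieces (exact): tag.lstrip("#") = dropWhile (· == '#'); `" " not in tag` for the
-- one-char needle is ' ' ∉ tag; tag[:k] for a nonnegative literal k is PySem.List.slice.
def sanitize_tags_pyAux : List String → List String → Int → List String
  | [], clean, _ => clean
  | tag :: rest, clean, total_len =>
    let t1 := (PySem.Chars.strip tag.toList).dropWhile (· == '#')
    let t2 := t1.filter pTag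
    let t3 := PySem.Chars.strip t2
    if t3 = [] then sanitize_tags_pyAux rest clean total_len
    else
      let t4 := if 30 < t3.length ∧ ' ' ∉ t3 then PySem.List.slice t3 none (some 30)
                else if 100 < t3.length then PySem.List.slice t3 none (some 100)
                else t3
      if 500 < total_len + (t4.length : Int) then clean
      else sanitize_tags_pyAux rest (clean ++ [String.ofList t4]) (total_len + (t4.length : Int))

def sanitize_tags_py (tags : List String) : List String :=
  sanitize_tags_pyAux tags [] 0

-- ===== PORT B =====
-- Source B's `rec`: the for-loop skipping empty cleanings is the structural recursion on the list;
-- a kept tag is consed onto the recursive call with the remaining budget.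
def sanitize_tags_py_altRec : List String → Int → List String
  | [], _ => []
  | raw :: it, budget =>
    let tag := PySem.Chars.strip (raw.toList.filter pTag)
    if tag = [] then sanitize_tags_py_altRec it budget
    else
      let t := PySem.List.slice tag none (some (if ' ' ∉ tag then 30 else 100))
      if budget < (t.length : Int) then []
      else String.ofList t :: sanitize_tags_py_altRec it (budget - (t.length : Int))

def sanitize_tags_py_alt (tags : List String) : List String :=
  sanitize_tags_py_altRec tags 500

-- ===== PRECONDITION & SPEC =====
def Spec_sanitize_tags_py (tags : List String) (out : List String) : Prop := out = sanitize_tags_py_alt tags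
instance (tags : List String) (out : List String) : Decidable (Spec_sanitize_tags_py tags out) := by unfold Spec_sanitize_tags_py; infer_instance

-- ===== CLAIM (what is proved, stated in full; the proofs are below) =====
def Claim_equal_sanitize_tags_py : Prop := ∀ (tags : List String), Dom_sanitize_tags_py tags → Spec_sanitize_tags_py tags (sanitize_tags_py tags)

-- ===== LEMMAS AND PROOFS =====

-- strip ignores a whitespace char prepended / appended
lemma strip_cons_ws {c : Char} (hc : PySem.Chars.isspace c = true) (t : List Char) :
    PySem.Chars.strip (c :: t) = PySem.Chars.strip t := by
  simp [PySem.Chars.strip, PySem.Chars.lstrip, List.dropWhile, hc]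

lemma rstrip_append_ws {c : Char} (hc : PySem.Chars.isspace c = true) (t : List Char) :
    PySem.Chars.rstrip (t ++ [c]) = PySem.Chars.rstrip t := by
  simp [PySem.Chars.rstrip, hc]

lemma rstrip_append_not_ws {c : Char} (hc : PySem.Chars.isspace c = false) (t : List Char) :
    PySem.Chars.rstrip (t ++ [c]) = t ++ [c] := by
  simp [PySem.Chars.rstrip, hc]

lemma strip_append_ws {c : Char} (hc : PySem.Chars.isspace c = true) (t : List Char) :
    PySem.Chars.strip (t ++ [c]) = PySem.Chars.strip t := by
  by_cases h : PySem.Chars.lstrip t = []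
  · have h2 : PySem.Chars.lstrip (t ++ [c]) = [] := by
      simp only [PySem.Chars.lstrip] at h ⊢
      rw [List.dropWhile_append, h]
      simp [List.dropWhile, hc]
    simp [PySem.Chars.strip, h, h2, PySem.Chars.rstrip]
  · have h2 : PySem.Chars.lstrip (t ++ [c]) = PySem.Chars.lstrip t ++ [c] := by
      simp only [PySem.Chars.lstrip] at h ⊢
      rw [List.dropWhile_append]
      simp [List.isEmpty_iff, h]
    simp only [PySem.Chars.strip, h2, rstrip_append_ws hc]

-- the filter erases the lstrip('#') pass ('#' fails pTag)
lemma filter_dropWhile_hash (m : List Char) :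
    (m.dropWhile (· == '#')).filter pTag = m.filter pTag := by
  induction m with
  | nil => rfl
  | cons c rest ih =>
    by_cases h : c = '#'
    · subst h; simpa [List.dropWhile, pTag, PySem.Chars.isalnum, PySem.Chars.isalpha,
        PySem.Chars.isdigit] using ih
    · have hb : (c == '#') = false := by simp [h]
      simp [List.dropWhile, hb]

-- the outer strip erases the inner lstrip pass
lemma strip_filter_lstrip (m : List Char) :
    PySem.Chars.strip ((PySem.Chars.lstrip m).filter pTag) =
      PySem.Chars.strip (m.filter pTag) := by
  induction m with
  | nil => rfl
  | cons c rest ih =>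
    by_cases h : PySem.Chars.isspace c = true
    · have h1 : PySem.Chars.lstrip (c :: rest) = PySem.Chars.lstrip rest := by
        simp [PySem.Chars.lstrip, List.dropWhile, h]
      rw [h1, ih, List.filter_cons]
      by_cases hp : pTag c = true
      · rw [if_pos hp, strip_cons_ws h]
      · rw [if_neg hp]
    · have h1 : PySem.Chars.lstrip (c :: rest) = c :: rest := by
        simp [PySem.Chars.lstrip, List.dropWhile, Bool.eq_false_iff.mpr h]
      rw [h1]

-- the outer strip erases the inner rstrip pass
lemma strip_filter_rstrip (m : List Char) :
    PySem.Chars.strip ((PySem.Chars.rstrip m).filter pTag) =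
      PySem.Chars.strip (m.filter pTag) := by
  induction m using List.reverseRecOn with
  | nil => rfl
  | append_singleton t c ih =>
    by_cases h : PySem.Chars.isspace c = true
    · rw [rstrip_append_ws h, ih, List.filter_append]
      by_cases hp : pTag c = true
      · have hc1 : List.filter pTag [c] = [c] := by simp [hp]
        rw [hc1, strip_append_ws h]
      · have hc0 : List.filter pTag [c] = [] := by simp [hp]
        rw [hc0, List.append_nil]
    · rw [rstrip_append_not_ws (Bool.eq_false_iff.mpr h)]

-- all together: A's cleaning pipeline equals B's filter+strip
lemma clean_eq (raw : List Char) :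
    PySem.Chars.strip
      (((PySem.Chars.strip raw).dropWhile (· == '#')).filter pTag) =
      PySem.Chars.strip (raw.filter pTag) := by
  rw [filter_dropWhile_hash]
  show PySem.Chars.strip ((PySem.Chars.rstrip (PySem.Chars.lstrip raw)).filter pTag) = _
  rw [strip_filter_rstrip, strip_filter_lstrip]

-- A's two-branch truncation equals B's computed-limit slice
lemma trunc_eq (t : List Char) :
    (if 30 < t.length ∧ ' ' ∉ t then PySem.List.slice t none (some 30)
     else if 100 < t.length then PySem.List.slice t none (some 100)
     else t) =
    PySem.List.slice t none (some (if ' ' ∉ t then 30 else 100)) := by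
  have h30 : PySem.List.slice t none (some 30) = t.take 30 := by
    rw [PySem.List.slice_to t (by norm_num)]; rfl
  have h100 : PySem.List.slice t none (some 100) = t.take 100 := by
    rw [PySem.List.slice_to t (by norm_num)]; rfl
  by_cases hsp : ' ' ∉ t
  · rw [if_pos hsp, h30]
    by_cases hl : 30 < t.length
    · rw [if_pos ⟨hl, hsp⟩]
    · rw [if_neg (fun h => hl h.1), if_neg (by omega), List.take_of_length_le (by omega)]
  · rw [if_neg hsp, h100, if_neg (fun h => hsp h.2)]
    by_cases hl : 100 < t.length
    · rw [if_pos hl]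
    · rw [if_neg hl, List.take_of_length_le (by omega)]

-- A's loop with running total `total` computes B's descent on budget 500 - total
lemma sanAux_eq (rest : List String) (clean : List String) (total : Int) :
    sanitize_tags_pyAux rest clean total =
      clean ++ sanitize_tags_py_altRec rest (500 - total) := by
  induction rest generalizing clean total with
  | nil => simp [sanitize_tags_pyAux, sanitize_tags_py_altRec]
  | cons raw rest ih =>
    show (if PySem.Chars.strip _ = [] then _ else _) = clean ++ sanitize_tags_py_altRec _ _
    rw [clean_eq raw.toList]
    simp only [sanitize_tags_py_altRec]
    set tag := PySem.Chars.strip (raw.toList.filter pTag) with htag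
    by_cases hE : tag = []
    · rw [if_pos hE, if_pos hE, ih]
    · rw [if_neg hE, if_neg hE, trunc_eq tag]
      set t := PySem.List.slice tag none (some (if ' ' ∉ tag then 30 else 100)) with ht
      by_cases hb : 500 < total + (t.length : Int)
      · rw [if_pos hb, if_pos (by omega), List.append_nil]
      · rw [if_neg hb, if_neg (by omega), ih]
        have : (500 : Int) - (total + t.length) = 500 - total - t.length := by omega
        rw [this, List.append_assoc, List.singleton_append]

-- ===== VERDICT (by name: the statement is the Claim_ definition above) =====
theorem sanitize_tags_py_spec : Claim_equal_sanitize_tags_py := by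
  intro tags _
  unfold Spec_sanitize_tags_py sanitize_tags_py sanitize_tags_py_alt
  rw [sanAux_eq tags [] 0, List.nil_append]
  norm_num
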